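-- pv_equiv track=rewrite | github.com/PLSE-Lab/Python-MLAPI-expl | python_sources/bert-abstraction.py | pred_size
-- ===== SOURCE A (Python) =====
-- def pred_size(sequ):
--     sequ = sequ[1:]
--     w = 0
--     h = 0
--     x = 0
--     y = 0
--     for n in range(len(sequ)):
--         if sequ[n] == 0: break
--         if sequ[n] == 3:
--             w = max(x, w)
--             x = 0
--             y += 1
--             continue
--         x += 1
--     h = y
--     return w, h
-- ===== SOURCE B (Python) =====
-- def pred_size(sequ):
--     body = sequ[1:]
--     if 0 in body:
--         body = body[:body.index(0)]
--     positions = [i for i, v in enumerate(body) if v == 3]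
--     h = len(positions)
--     w = 0
--     prev = -1
--     for p in positions:
--         w = max(w, p - prev - 1)
--         prev = p
--     return w, h
-- ===== Notes on version B (the rewrite author's own statement) =====
-- stated objective: alternative
-- what changed: Replaces A's single break-and-counters scan with a decomposition: truncate the body at the first 0, collect the indices of the terminator 3, take h as their count and w as the maximum gap between consecutive indices.
import Mathlib
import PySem

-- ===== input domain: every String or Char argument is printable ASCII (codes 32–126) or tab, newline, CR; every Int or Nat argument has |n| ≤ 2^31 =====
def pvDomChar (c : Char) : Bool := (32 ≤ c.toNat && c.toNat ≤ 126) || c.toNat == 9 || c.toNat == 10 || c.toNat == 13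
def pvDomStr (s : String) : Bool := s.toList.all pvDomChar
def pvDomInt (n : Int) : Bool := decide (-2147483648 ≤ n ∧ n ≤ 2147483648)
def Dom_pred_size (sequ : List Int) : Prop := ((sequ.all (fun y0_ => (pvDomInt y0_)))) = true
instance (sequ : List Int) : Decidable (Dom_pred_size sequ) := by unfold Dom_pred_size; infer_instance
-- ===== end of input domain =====

-- B replaces A's break-and-counters scan by truncating at the first 0, collecting the
-- indices of 3 and reducing them (alternative decomposition, same O(n) cost).

-- ===== PORT A =====
-- the for-loop over sequ with state (w, x, y); the break at 0 returns immediately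
def predLoopA : List Int → Int → Int → Int → Int × Int
  | [], w, _, y => (w, y)
  | n :: t, w, x, y =>
      if n = 0 then (w, y)
      else if n = 3 then predLoopA t (max x w) 0 (y + 1)
      else predLoopA t w (x + 1) y

def pred_size (sequ : List Int) : Int × Int :=
  predLoopA (PySem.List.slice sequ (some 1) none) 0 0 0

-- ===== PORT B =====
def pred_size_alt (sequ : List Int) : Int × Int :=
  let body := PySem.List.slice sequ (some 1) none
  let body := if body.contains 0 then body.take ((PySem.List.index? body 0).getD 0) else body
  let positions := ((PySem.List.enumerate body 0).filter (fun p => p.2 == 3)).map (·.1)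
  let h : Int := positions.length
  let wp := positions.foldl (fun (wp : Int × Int) p => (max wp.1 (p - wp.2 - 1), p)) (0, -1)
  (wp.1, h)

-- ===== PRECONDITION & SPEC =====
def Spec_pred_size (sequ : List Int) (out : Int × Int) : Prop := out = pred_size_alt sequ
instance (sequ : List Int) (out : Int × Int) : Decidable (Spec_pred_size sequ out) := by unfold Spec_pred_size; infer_instance

-- ===== CLAIM (what is proved, stated in full; the proofs are below) =====
def Claim_equal_pred_size : Prop := ∀ (sequ : List Int), Dom_pred_size sequ → Spec_pred_size sequ (pred_size sequ)

-- ===== LEMMAS AND PROOFS =====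

-- B's truncation at the first 0 is takeWhile (≠ 0)
lemma trunc_eq_takeWhile (l : List Int) :
    (if l.contains 0 then l.take ((PySem.List.index? l 0).getD 0) else l)
      = l.takeWhile (fun a => !(a == 0)) := by
  induction l with
  | nil => simp
  | cons a t ih =>
    by_cases ha : a = 0
    · subst ha
      rw [PySem.List.index?_cons_self]
      simp
    · rw [PySem.List.index?_cons_of_ne t ha, List.takeWhile_cons]
      by_cases hc : t.contains 0 = true
      · have hmem : (0 : Int) ∈ t := by simpa using hc
        have hs : (PySem.List.index? t 0).isSome := by
          rw [PySem.List.index?_isSome_iff]; exact hmem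
        obtain ⟨k, hk⟩ := Option.isSome_iff_exists.mp hs
        rw [if_pos (by simp [hmem]), hk]
        rw [if_pos hc, hk] at ih
        simp only [Option.getD_some] at ih
        simp only [Option.map_some, Option.getD_some, List.take_succ_cons]
        simp [show ((a : Int) == 0) = false by simpa using ha, ih]
      · have hnm : (0 : Int) ∉ t := by simpa using hc
        rw [if_neg hc] at ih
        rw [if_neg (by simp [hnm]; omega)]
        simp [show ((a : Int) == 0) = false by simpa using ha, ← ih]

-- A's loop ignores everything from the first 0 on
lemma predLoopA_takeWhile (l : List Int) (w x y : Int) :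
    predLoopA l w x y = predLoopA (l.takeWhile (fun a => !(a == 0))) w x y := by
  induction l generalizing w x y with
  | nil => rfl
  | cons n t ih =>
    by_cases hn : n = 0
    · subst hn; simp [predLoopA]
    · simp only [List.takeWhile_cons, show (n == 0) = false by simpa using hn,
        Bool.not_false]
      by_cases h3 : n = 3
      · subst h3; simp [predLoopA, ih]
      · simp [predLoopA, hn, h3, ih]

-- positions of value 3 starting at index s, as B builds them
def pos3 (s : Int) (l : List Int) : List Int :=
  ((PySem.List.enumerate l s).filter (fun p => p.2 == 3)).map (·.1)

def stepB (wp : Int × Int) (p : Int) : Int × Int := (max wp.1 (p - wp.2 - 1), p)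

-- main invariant: on a 0-free list, A's loop equals B's reduction of the 3-positions
lemma predLoopA_eq_fold (l : List Int) (s w x y : Int) (h0 : ∀ a ∈ l, a ≠ 0) :
    predLoopA l w x y
      = (((pos3 s l).foldl stepB (w, s - x - 1)).1, y + ((pos3 s l).length : Int)) := by
  induction l generalizing s w x y with
  | nil => simp [predLoopA, pos3, PySem.List.enumerate_nil]
  | cons n t ih =>
    have hn : n ≠ 0 := h0 n (by simp)
    have ht : ∀ a ∈ t, a ≠ 0 := fun a ha => h0 a (by simp [ha])
    by_cases h3 : n = 3
    · subst h3
      have hp : pos3 s (3 :: t) = s :: pos3 (s + 1) t := by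
        simp [pos3, PySem.List.enumerate_cons]
      rw [hp]
      simp only [predLoopA, if_neg hn, List.foldl_cons, List.length_cons]
      rw [ih (s + 1) (max x w) 0 (y + 1) ht]
      have harg : stepB (w, s - x - 1) s = (max x w, (s + 1) - 0 - 1) := by
        simp [stepB, max_comm]; ring_nf
      rw [harg]
      simp only [if_true]
      congr 1
      push_cast; ring
    · have hp : pos3 s (n :: t) = pos3 (s + 1) t := by
        simp [pos3, PySem.List.enumerate_cons, h3]
      rw [hp]
      simp only [predLoopA, if_neg hn, if_neg h3]
      rw [ih (s + 1) w (x + 1) y ht]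
      ring_nf

-- ===== VERDICT (by name: the statement is the Claim_ definition above) =====
theorem pred_size_spec : Claim_equal_pred_size := by
  intro sequ _
  unfold Spec_pred_size pred_size pred_size_alt
  set b := PySem.List.slice sequ (some 1) none with hb
  dsimp only
  rw [trunc_eq_takeWhile]
  rw [predLoopA_takeWhile]
  rw [predLoopA_eq_fold (b.takeWhile (fun a => !(a == 0))) 0 0 0 0
    (by intro a ha; have := List.mem_takeWhile_imp ha; simpa using this)]
  unfold stepB
  simp [pos3]
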